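-- pv_equiv track=rewrite | github.com/kate-kate-kate-m/weather-bot | weather.py | get_rain_description
-- ===== SOURCE A (Python) =====
-- RAIN_THRESHOLD = 40  # % probability considered "likely rain"
--
-- def fmt_hour(h):
--     if h == 0: return "midnight"
--     if h == 12: return "noon"
--     if h < 12: return f"{h}am"
--     return f"{h - 12}pm"
--
-- def get_rain_description(hourly_probs_today):
--     """Return a rain description string, or None if no rain expected."""
--     rainy_hours = [h for h, p in enumerate(hourly_probs_today) if p >= RAIN_THRESHOLD]
--     if not rainy_hours:
--         return None
--
--     # Find contiguous windows
--     windows = []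
--     start = rainy_hours[0]
--     prev = rainy_hours[0]
--     for h in rainy_hours[1:]:
--         if h > prev + 1:
--             windows.append((start, prev + 1))
--             start = h
--         prev = h
--     windows.append((start, prev + 1))
--
--     # Label each window by time of day
--     def label(start, end):
--         mid = (start + end) // 2
--         max_prob = max(hourly_probs_today[start:end])
--         if 6 <= mid < 12:
--             period = "morning"
--         elif 12 <= mid < 18:
--             period = "afternoon"
--         elif 18 <= mid < 22:
--             period = "evening"
--         else:
--             period = "overnight"
--         return f"{period} ({fmt_hour(start)}–{fmt_hour(end)}, {max_prob}%)"
--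
--     parts = [label(s, e) for s, e in windows]
--     return "🌧 Rain expected: " + ", ".join(parts)
-- ===== SOURCE B (Python) =====
-- RAIN_THRESHOLD = 40  # % probability considered "likely rain"
--
-- def fmt_hour(h):
--     if h == 0: return "midnight"
--     if h == 12: return "noon"
--     if h < 12: return f"{h}am"
--     return f"{h - 12}pm"
--
-- def _describe(group):
--     start, last, max_prob = group
--     end = last + 1
--     mid = (start + end) // 2
--     if 6 <= mid < 12:
--         period = "morning"
--     elif 12 <= mid < 18:
--         period = "afternoon"
--     elif 18 <= mid < 22:
--         period = "evening"
--     else: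
--         period = "overnight"
--     return f"{period} ({fmt_hour(start)}–{fmt_hour(end)}, {max_prob}%)"
--
-- def get_rain_description(hourly_probs_today):
--     """Return a rain description string, or None if no rain expected."""
--     groups = []          # finished rainy runs as (start, last_hour, max_prob)
--     cur = None           # the open rainy run, same shape
--     for h, p in enumerate(hourly_probs_today):
--         if p >= RAIN_THRESHOLD:
--             if cur is None:
--                 cur = (h, h, p)
--             else:
--                 s, _, m = cur
--                 cur = (s, h, p if p > m else m)
--         elif cur is not None:
--             groups.append(cur)
--             cur = None
--     if cur is not None:
--         groups.append(cur)
--     if not groups: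
--         return None
--     return "🌧 Rain expected: " + ", ".join(_describe(g) for g in groups)
-- ===== Notes on version B (the rewrite author's own statement) =====
-- stated objective: alternative
-- what changed: Replaces A's three phases (collect rainy-hour indices, gap-scan them into windows, then re-slice the list for each window's max) with a single streaming pass over enumerate() that maintains the open run's (start, last, max) and closes it on the first non-rainy hour, so the rainy_hours list, the gap loop and the per-window max(slice) all disappear.
import Mathlib
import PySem

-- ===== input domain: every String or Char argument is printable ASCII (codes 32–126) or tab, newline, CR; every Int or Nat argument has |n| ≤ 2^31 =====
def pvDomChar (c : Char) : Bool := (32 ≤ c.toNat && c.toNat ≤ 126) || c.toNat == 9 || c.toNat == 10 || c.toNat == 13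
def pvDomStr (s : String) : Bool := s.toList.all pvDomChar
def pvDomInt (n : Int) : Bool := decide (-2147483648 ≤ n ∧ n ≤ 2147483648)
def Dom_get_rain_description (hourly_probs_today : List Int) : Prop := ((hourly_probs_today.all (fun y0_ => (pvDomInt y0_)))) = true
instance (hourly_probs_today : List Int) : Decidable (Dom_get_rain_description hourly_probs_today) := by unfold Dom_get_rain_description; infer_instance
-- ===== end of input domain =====

-- B replaces A's three phases (collect rainy indices, gap-scan into windows, re-slice for each
-- window's max) with ONE streaming pass that maintains the open run's (start, last, max);
-- alternative decomposition, same O(n) cost, identical return value.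

-- ===== PORT A =====
def RAIN_THRESHOLD : Int := 40

def fmt_hour (h : Int) : String :=
  if h = 0 then "midnight"
  else if h = 12 then "noon"
  else if h < 12 then PySem.Int.toStr h ++ "am"
  else PySem.Int.toStr (h - 12) ++ "pm"

-- body of A's gap-detection loop; state = (windows, start, prev)
def pvStepA (st : List (Int × Int) × Int × Int) (h : Int) : List (Int × Int) × Int × Int :=
  if h > st.2.2 + 1 then (st.1 ++ [(st.2.1, st.2.2 + 1)], h, h) else (st.1, st.2.1, h)

-- A's inner closure 'label', with its capture of hourly_probs_today made explicit.
-- Python's max() raises on an empty sequence; every window here is nonempty, so the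
-- .getD 0 default is unreachable.
def pvLabel (hourly_probs_today : List Int) (start stop : Int) : String :=
  let mid := PySem.Int.floordiv (start + stop) 2
  let max_prob := (PySem.List.max? (PySem.List.slice hourly_probs_today (some start) (some stop)) (fun y => y)).getD 0
  let period :=
    if 6 ≤ mid ∧ mid < 12 then "morning"
    else if 12 ≤ mid ∧ mid < 18 then "afternoon"
    else if 18 ≤ mid ∧ mid < 22 then "evening"
    else "overnight"
  period ++ " (" ++ fmt_hour start ++ "–" ++ fmt_hour stop ++ ", " ++ PySem.Int.toStr max_prob ++ "%)"

def get_rain_description (hourly_probs_today : List Int) : Option String :=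
  match ((PySem.List.enumerate hourly_probs_today).filter (fun hp => hp.2 ≥ RAIN_THRESHOLD)).map (fun hp => hp.1) with
  | [] => none
  | r0 :: rest =>
    let st := rest.foldl pvStepA ([], r0, r0)
    let windows := st.1 ++ [(st.2.1, st.2.2 + 1)]
    let parts := windows.map (fun w => pvLabel hourly_probs_today w.1 w.2)
    some ("🌧 Rain expected: " ++ PySem.Str.join ", " parts)

-- ===== PORT B =====
-- loop body of B's single pass; state = (finished groups, open run); a group is (start, last, max_prob)
def pvStepB (st : List (Int × Int × Int) × Option (Int × Int × Int)) (hp : Int × Int) :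
    List (Int × Int × Int) × Option (Int × Int × Int) :=
  if hp.2 ≥ RAIN_THRESHOLD then
    match st.2 with
    | none => (st.1, some (hp.1, hp.1, hp.2))
    | some c => (st.1, some (c.1, hp.1, if hp.2 > c.2.2 then hp.2 else c.2.2))
  else
    match st.2 with
    | some c => (st.1 ++ [c], none)
    | none => st

def pvDescribe (g : Int × Int × Int) : String :=
  let stop := g.2.1 + 1
  let mid := PySem.Int.floordiv (g.1 + stop) 2
  let period :=
    if 6 ≤ mid ∧ mid < 12 then "morning"
    else if 12 ≤ mid ∧ mid < 18 then "afternoon"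
    else if 18 ≤ mid ∧ mid < 22 then "evening"
    else "overnight"
  period ++ " (" ++ fmt_hour g.1 ++ "–" ++ fmt_hour stop ++ ", " ++ PySem.Int.toStr g.2.2 ++ "%)"

def get_rain_description_alt (hourly_probs_today : List Int) : Option String :=
  let st := (PySem.List.enumerate hourly_probs_today).foldl pvStepB ([], none)
  let groups := st.1 ++ (match st.2 with | some c => [c] | none => [])
  match groups with
  | [] => none
  | _ :: _ => some ("🌧 Rain expected: " ++ PySem.Str.join ", " (groups.map pvDescribe))

-- ===== PRECONDITION & SPEC =====
def Spec_get_rain_description (hourly_probs_today : List Int) (out : Option String) : Prop := out = get_rain_description_alt hourly_probs_today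
instance (hourly_probs_today : List Int) (out : Option String) : Decidable (Spec_get_rain_description hourly_probs_today out) := by unfold Spec_get_rain_description; infer_instance

-- ===== CLAIM (what is proved, stated in full; the proofs are below) =====
def Claim_equal_get_rain_description : Prop := ∀ (hourly_probs_today : List Int), Dom_get_rain_description hourly_probs_today → Spec_get_rain_description hourly_probs_today (get_rain_description hourly_probs_today)

-- ===== LEMMAS AND PROOFS =====

-- A's seeded fold, lifted to an Option state so it starts from 'none'
def pvStepA' (ost : Option (List (Int × Int) × Int × Int)) (h : Int) :
    Option (List (Int × Int) × Int × Int) :=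
  match ost with
  | none => some ([], h, h)
  | some st => some (pvStepA st h)

-- A's fold over the filtered rainy list, re-expressed over the full enumerate list
def pvGuard (ost : Option (List (Int × Int) × Int × Int)) (hp : Int × Int) :
    Option (List (Int × Int) × Int × Int) :=
  if hp.2 ≥ RAIN_THRESHOLD then pvStepA' ost hp.1 else ost

def pvMaxSlice (xs : List Int) (a b : Int) : Int :=
  (PySem.List.max? (PySem.List.slice xs (some a) (some b)) (fun y => y)).getD 0

def pvGroups (st : List (Int × Int × Int) × Option (Int × Int × Int)) : List (Int × Int × Int) :=
  st.1 ++ (match st.2 with | some c => [c] | none => [])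

-- invariant tying A's fold state to B's after processing the first i hours
def pvInv (xs : List Int) (i : Nat) (ost : Option (List (Int × Int) × Int × Int))
    (stB : List (Int × Int × Int) × Option (Int × Int × Int)) : Prop :=
  match ost with
  | none => stB = ([], none)
  | some st =>
      (pvGroups stB).map (fun g => (g.1, g.2.1 + 1)) = st.1 ++ [(st.2.1, st.2.2 + 1)]
      ∧ (∀ g ∈ pvGroups stB, g.2.2 = pvMaxSlice xs g.1 (g.2.1 + 1))
      ∧ (match stB.2 with
         | some c => c.1 = st.2.1 ∧ c.2.1 = st.2.2 ∧ c.2.1 = (i : Int) - 1 ∧ 0 ≤ c.1 ∧ c.1 ≤ c.2.1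
         | none => st.2.2 + 2 ≤ (i : Int))

theorem pvOptFold (l : List Int) (st : List (Int × Int) × Int × Int) :
    l.foldl pvStepA' (some st) = some (l.foldl pvStepA st) := by
  induction l generalizing st with
  | nil => rfl
  | cons h t ih => simpa [pvStepA'] using ih (pvStepA st h)

theorem pvFoldlExt {α β : Type} (f g : β → α → β) (hfg : ∀ s a, f s a = g s a)
    (l : List α) (init : β) : l.foldl f init = l.foldl g init := by
  induction l generalizing init with
  | nil => rfl
  | cons a t ih => rw [List.foldl_cons, List.foldl_cons, hfg]; exact ih _

theorem pvA_eq_guardFold (xs : List Int) :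
    (((PySem.List.enumerate xs).filter (fun hp => hp.2 ≥ RAIN_THRESHOLD)).map (fun hp => hp.1)).foldl pvStepA' none
      = (PySem.List.enumerate xs).foldl pvGuard none := by
  rw [List.foldl_map, List.foldl_filter]
  exact pvFoldlExt _ _ (fun s a => by by_cases h : a.2 ≥ RAIN_THRESHOLD <;> simp [pvGuard, h]) _ _

theorem pvIfMax (m p : Int) : (if p > m then p else m) = max m p := by
  rcases le_total m p with h | h <;> simp [max_def] <;> omega

theorem pvMaxSlice_single (xs : List Int) (i : Nat) (hi : i < xs.length) :
    pvMaxSlice xs (i : Int) ((i : Int) + 1) = xs[i] := by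
  unfold pvMaxSlice
  rw [show ((i : Int) + 1) = ((i : Int) + ((1 : Nat) : Int)) by norm_num,
    PySem.List.slice_natCast_add]
  rw [List.drop_eq_getElem_cons hi, List.take_succ_cons, List.take_zero,
    PySem.List.max?_id_cons]
  simp

theorem pvMaxSlice_extend (xs : List Int) (a b : Nat) (hab : a < b) (hb : b < xs.length) :
    pvMaxSlice xs (a : Int) ((b : Int) + 1) = max (pvMaxSlice xs (a : Int) (b : Int)) xs[b] := by
  unfold pvMaxSlice
  rw [show ((b : Int) + 1) = (((b + 1 : Nat)) : Int) by push_cast; ring,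
    PySem.List.slice_natCast, PySem.List.slice_natCast]
  have h1 : b + 1 - a = (b - a) + 1 := by omega
  have h2 : (List.drop a xs)[b - a]? = some xs[b] := by
    rw [List.getElem?_drop, List.getElem?_eq_getElem (by omega)]
    congr 1
    congr 1
    omega
  rw [h1, List.take_add_one, h2]
  have h3 : List.drop a xs = xs[a] :: List.drop (a + 1) xs := List.drop_eq_getElem_cons (by omega)
  have h4 : b - a = (b - a - 1) + 1 := by omega
  rw [h3, h4, List.take_succ_cons]
  simp [PySem.List.max?_id_cons, List.foldl_append]

theorem pvStep_inv (xs : List Int) (i : Nat) (p : Int) (hp : xs[i]? = some p)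
    (ost : Option (List (Int × Int) × Int × Int))
    (stB : List (Int × Int × Int) × Option (Int × Int × Int))
    (hInv : pvInv xs i ost stB) :
    pvInv xs (i + 1) (pvGuard ost ((i : Int), p)) (pvStepB stB ((i : Int), p)) := by
  have hi : i < xs.length := by
    by_contra h
    rw [List.getElem?_eq_none (by omega)] at hp
    simp at hp
  have hxi : xs[i] = p := by
    rw [List.getElem?_eq_getElem hi] at hp
    injection hp
  rcases ost with _ | ⟨w, s, prev⟩
  · -- no rainy hour seen yet on either side
    simp only [pvInv] at hInv
    subst hInv
    by_cases h40 : p ≥ RAIN_THRESHOLD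
    · simp only [pvGuard, pvStepA', pvStepB, if_pos h40, pvInv, pvGroups]
      refine ⟨by simp, ?_, by trivial, by trivial, by push_cast; ring, by simp, by simp⟩
      intro g hg
      simp only [List.nil_append, List.mem_singleton] at hg
      subst hg
      simpa [hxi] using (pvMaxSlice_single xs i hi).symm
    · simp only [pvGuard, pvStepA', pvStepB, if_neg h40, pvInv]
  · rcases stB with ⟨parts, cur⟩
    simp only [pvInv] at hInv
    obtain ⟨hmap, hmax, hpos⟩ := hInv
    rcases cur with _ | ⟨cs, cl, cm⟩
    · -- open run closed; A's pending window ends at prev < i - 1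
      simp only at hpos
      by_cases h40 : p ≥ RAIN_THRESHOLD
      · -- gap: A flushes (s, prev+1), both open a fresh run at i
        simp only [pvGuard, pvStepA', pvStepB, pvStepA, if_pos h40, pvInv, pvGroups]
        rw [if_pos (show ((i : Int), p).1 > prev + 1 by simp; omega)]
        simp only [pvGroups] at hmap hmax
        refine ⟨?_, ?_, by trivial, by trivial, by push_cast; ring, by simp, by simp⟩
        · simp only [List.map_append, List.append_nil] at hmap ⊢
          simp [hmap]
        · intro g hg
          rcases List.mem_append.1 hg with hg | hg
          · exact hmax g (by simpa using hg)
          · simp only [List.mem_singleton] at hg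
            subst hg
            simpa [hxi] using (pvMaxSlice_single xs i hi).symm
      · -- still dry: both sides unchanged
        simp only [pvGuard, pvStepB, if_neg h40, pvInv, pvGroups]
        exact ⟨hmap, hmax, by omega⟩
    · -- run open on both sides: cs = s, cl = prev = i - 1
      simp only at hpos
      obtain ⟨hc1, hc2, hc3, hc4, hc5⟩ := hpos
      by_cases h40 : p ≥ RAIN_THRESHOLD
      · -- extend the open run
        simp only [pvGuard, pvStepA', pvStepB, pvStepA, if_pos h40, pvInv, pvGroups]
        rw [if_neg (show ¬((i : Int), p).1 > prev + 1 by simp; omega)]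
        simp only [pvGroups] at hmap hmax
        have hmm : cm = pvMaxSlice xs cs ((i : Int)) := by
          have := hmax (cs, cl, cm) (by simp)
          simpa [show cl + 1 = ((i : Int)) by omega] using this
        refine ⟨?_, ?_, hc1, by trivial, by push_cast; ring, hc4, by omega⟩
        · simp only [List.map_append] at hmap ⊢
          obtain ⟨hw, hlast⟩ := List.append_inj' hmap (by simp)
          simp only [List.map_cons, List.map_nil, List.cons.injEq, Prod.mk.injEq] at hlast
          simp [hw, hc1]
        · intro g hg
          rcases List.mem_append.1 hg with hg | hg
          · exact hmax g (by simp [hg])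
          · simp only [List.mem_singleton] at hg
            subst hg
            simp only
            have ha : ((cs.toNat : Nat) : Int) = cs := Int.toNat_of_nonneg hc4
            have hab : cs.toNat < i := by omega
            have hext := pvMaxSlice_extend xs cs.toNat i hab hi
            rw [ha] at hext
            rw [hext, ← hmm, hxi, pvIfMax]
      · -- run ends: B flushes the group, A's pending window is already (s, prev+1)
        simp only [pvGuard, pvStepB, if_neg h40, pvInv, pvGroups]
        simp only [pvGroups] at hmap hmax
        refine ⟨?_, ?_, by omega⟩
        · simpa [List.append_assoc] using hmap
        · intro g hg
          exact hmax g (by simpa [List.append_assoc] using hg)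

theorem pvCore (ys xs : List Int) (i : Nat)
    (ost : Option (List (Int × Int) × Int × Int))
    (stB : List (Int × Int × Int) × Option (Int × Int × Int))
    (hx : xs.drop i = ys) (hInv : pvInv xs i ost stB) :
    pvInv xs (i + ys.length)
      ((PySem.List.enumerate ys (i : Int)).foldl pvGuard ost)
      ((PySem.List.enumerate ys (i : Int)).foldl pvStepB stB) := by
  induction ys generalizing i ost stB with
  | nil => simpa using hInv
  | cons p t ih =>
    have hi : i < xs.length := by
      by_contra h
      rw [List.drop_eq_nil_of_le (by omega)] at hx
      simp at hx
    rw [List.drop_eq_getElem_cons hi] at hx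
    injection hx with h1 hx'
    have hpi : xs[i]? = some p := by rw [List.getElem?_eq_getElem hi, h1]
    rw [PySem.List.enumerate_cons]
    have hcast : ((i : Int) + 1) = (((i + 1 : Nat)) : Int) := by push_cast; ring
    rw [List.foldl_cons, List.foldl_cons, hcast]
    have := ih (i + 1) _ _ hx' (pvStep_inv xs i p hpi ost stB hInv)
    simpa [Nat.add_assoc, Nat.add_comm 1 t.length] using this

theorem pvLabel_describe (xs : List Int) (g : Int × Int × Int)
    (hm : g.2.2 = pvMaxSlice xs g.1 (g.2.1 + 1)) :
    pvLabel xs g.1 (g.2.1 + 1) = pvDescribe g := by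
  simp only [pvLabel, pvDescribe, pvMaxSlice] at *
  rw [← hm]

-- ===== VERDICT (by name: the statement is the Claim_ definition above) =====
theorem get_rain_description_spec : Claim_equal_get_rain_description := by
  intro xs _
  unfold Spec_get_rain_description
  have hinv : pvInv xs (0 + xs.length)
      ((PySem.List.enumerate xs ((0 : Nat) : Int)).foldl pvGuard none)
      ((PySem.List.enumerate xs ((0 : Nat) : Int)).foldl pvStepB ([], none)) :=
    pvCore xs xs 0 none ([], none) (by simp) (by simp [pvInv])
  simp only [Nat.cast_zero, Nat.zero_add] at hinv
  have hAg := pvA_eq_guardFold xs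
  set stB := (PySem.List.enumerate xs).foldl pvStepB ([], none) with hstB
  cases hr : ((PySem.List.enumerate xs).filter (fun hp => hp.2 ≥ RAIN_THRESHOLD)).map (fun hp => hp.1) with
  | nil =>
    have h0 : (PySem.List.enumerate xs).foldl pvGuard none = none := by
      rw [← hAg, hr]
      rfl
    rw [h0] at hinv
    simp only [pvInv] at hinv
    have hA : get_rain_description xs = none := by
      unfold get_rain_description
      rw [hr]
    have hB : get_rain_description_alt xs = none := by
      unfold get_rain_description_alt
      rw [← hstB, hinv]
      rfl
    rw [hA, hB]
  | cons r0 rest =>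
    have hsome : (PySem.List.enumerate xs).foldl pvGuard none
        = some (rest.foldl pvStepA ([], r0, r0)) := by
      rw [← hAg, hr, List.foldl_cons]
      exact pvOptFold rest ([], r0, r0)
    rw [hsome] at hinv
    simp only [pvInv] at hinv
    obtain ⟨hmap, hmax, -⟩ := hinv
    set st := rest.foldl pvStepA ([], r0, r0) with hst
    have hA : get_rain_description xs
        = some ("🌧 Rain expected: " ++ PySem.Str.join ", "
            ((st.1 ++ [(st.2.1, st.2.2 + 1)]).map (fun w => pvLabel xs w.1 w.2))) := by
      unfold get_rain_description
      rw [hr]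
    have halt : get_rain_description_alt xs
        = (match pvGroups stB with
           | [] => none
           | _ :: _ => some ("🌧 Rain expected: " ++ PySem.Str.join ", " ((pvGroups stB).map pvDescribe))) := rfl
    have hparts : (st.1 ++ [(st.2.1, st.2.2 + 1)]).map (fun w => pvLabel xs w.1 w.2)
        = (pvGroups stB).map pvDescribe := by
      rw [← hmap, List.map_map]
      exact List.map_congr_left (fun g hg => pvLabel_describe xs g (hmax g hg))
    cases hP : pvGroups stB with
    | nil =>
      rw [hP] at hmap
      simp at hmap
    | cons g0 P' =>
      rw [hA, halt, hP, hparts, hP]
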